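-- pv_equiv track=rewrite | github.com/MrBrantCode/unitest_baseline | mut_generate/mist_train_cf/cf_68465/solution.py | verifyAndGeneratePostorder
-- ===== SOURCE A (Python) =====
-- def verifyAndGeneratePostorder(preorder):
--     root = float('-inf')
--     stack = []
--     postorder = []
--
--     def generatePostOrder(preorder):
--         if not preorder: return []
--         root = preorder[0]
--         i = next((i for i, val in enumerate(preorder) if val > root), len(preorder))
--         return generatePostOrder(preorder[1:i]) + generatePostOrder(preorder[i:]) + [root]
--
--     for value in preorder:
--         if value < root:
--             return False, []
--         while stack and stack[-1] < value:
--             root = stack.pop()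
--         stack.append(value)
--     postorder = generatePostOrder(preorder)
--     return True, postorder
-- ===== SOURCE B (Python) =====
-- def verifyAndGeneratePostorder(preorder):
--     n = len(preorder)
--     out = []
--     i = 0
--
--     def build(lo, hi):
--         # consume the maximal segment of preorder[i:] whose values are <= hi,
--         # appending its postorder to out; lo is the lower bound inherited from
--         # the nearest right-subtree ancestor.  Returns False on a violation.
--         nonlocal i
--         if i == n:
--             return True
--         v = preorder[i]
--         if hi is not None and v > hi:
--             return True
--         if lo is not None and v < lo:
--             return False
--         i += 1
--         if not build(lo, v):
--             return False
--         if not build(v, hi):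
--             return False
--         out.append(v)
--         return True
--
--     if build(None, None):
--         return True, out
--     return False, []
-- ===== Notes on version B (the rewrite author's own statement) =====
-- stated objective: faster
-- what changed: A validates with a stack pass and then builds the postorder by repeatedly rescanning and slicing sublists (quadratic on valid inputs); B does one linear recursive descent over the input with lower/upper bounds that validates and emits the postorder in a single pass without any slicing or rescanning.
import Mathlib
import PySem

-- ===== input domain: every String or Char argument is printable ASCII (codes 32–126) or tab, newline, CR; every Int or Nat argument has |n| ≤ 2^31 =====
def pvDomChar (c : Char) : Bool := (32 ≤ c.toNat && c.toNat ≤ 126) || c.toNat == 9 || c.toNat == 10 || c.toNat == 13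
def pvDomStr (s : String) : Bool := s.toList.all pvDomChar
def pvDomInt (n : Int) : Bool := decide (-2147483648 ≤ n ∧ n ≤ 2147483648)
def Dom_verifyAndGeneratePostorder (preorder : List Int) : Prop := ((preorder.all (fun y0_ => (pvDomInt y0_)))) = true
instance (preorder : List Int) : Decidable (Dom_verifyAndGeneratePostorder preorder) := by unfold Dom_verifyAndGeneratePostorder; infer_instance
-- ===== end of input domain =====

-- B replaces A's quadratic slice-and-rescan postorder recursion (plus a separate stack
-- validation pass) by one linear recursive descent over the remaining input with
-- lower/upper bounds that validates and emits the postorder in a single pass.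


-- ===== PORT A =====
-- A's `root = float('-inf')` is modelled as `Option Int` with `none` = -inf:
-- `value < -inf` is False for every int, exactly Python's comparison.
def ltRoot (root : Option Int) (v : Int) : Bool :=
  match root with
  | none => false
  | some r => decide (v < r)

-- `while stack and stack[-1] < value: root = stack.pop()`; the Python list's last
-- element (its top) is the head of the Lean list.
def popLoop (root : Option Int) (stack : List Int) (v : Int) : Option Int × List Int :=
  match stack with
  | [] => (root, [])
  | t :: rest => if t < v then popLoop (some t) rest v else (root, t :: rest)

-- `for value in preorder: ...` (the validation loop; returns False early on a violation)
def checkLoop (root : Option Int) (stack : List Int) : List Int → Bool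
  | [] => true
  | v :: vs =>
    if ltRoot root v then false
    else
      let rs := popLoop root stack v
      checkLoop rs.1 (v :: rs.2) vs

-- `generatePostOrder`; `next((i for i, val in enumerate(preorder) if val > root), len(preorder))`
-- is List.findIdx (which returns the length when no element matches, like the `next` default).
-- The fuel argument only makes the recursion total: each recursive call is on a strictly
-- shorter list, so fuel = length + 1 at the top is never exhausted.
def genPostF : Nat → List Int → List Int
  | 0, _ => []
  | _ + 1, [] => []
  | fuel + 1, root :: rest =>
    let i := List.findIdx (fun val => decide (root < val)) (root :: rest)
    genPostF fuel (PySem.List.slice (root :: rest) (some (1 : Int)) (some ((i : Nat) : Int)))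
      ++ genPostF fuel (PySem.List.slice (root :: rest) (some ((i : Nat) : Int)) none)
      ++ [root]

def verifyAndGeneratePostorder (preorder : List Int) : Bool × List Int :=
  if checkLoop none [] preorder then (true, genPostF (preorder.length + 1) preorder)
  else (false, [])

-- ===== PORT B =====
-- `hi is not None and v > hi`
def gtHi (hi : Option Int) (v : Int) : Bool :=
  match hi with
  | none => false
  | some h => decide (h < v)

-- `lo is not None and v < lo`
def ltLo (lo : Option Int) (v : Int) : Bool :=
  match lo with
  | none => false
  | some l => decide (v < l)

-- Source B's `build(lo, hi)`: the Python index `i` into `preorder` is rendered as the remaining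
-- suffix `preorder[i:]`, the mutated `out` as the returned postorder chunk; result =
-- (ok, chunk appended to out, remaining suffix).  Fuel only makes the recursion total
-- (every call consumes at least one element before recursing; length + 1 is never exhausted).
def bbuild : Nat → Option Int → Option Int → List Int → Bool × List Int × List Int
  | 0, _, _, l => (true, [], l)
  | fuel + 1, lo, hi, l =>
    match l with
    | [] => (true, [], [])
    | v :: rest =>
      if gtHi hi v then (true, [], v :: rest)
      else if ltLo lo v then (false, [], v :: rest)
      else
        match bbuild fuel lo (some v) rest with
        | (false, _, r1) => (false, [], r1)
        | (true, p1, r1) =>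
          match bbuild fuel (some v) hi r1 with
          | (false, _, r2) => (false, [], r2)
          | (true, p2, r2) => (true, p1 ++ p2 ++ [v], r2)

def verifyAndGeneratePostorder_alt (preorder : List Int) : Bool × List Int :=
  match bbuild (preorder.length + 1) none none preorder with
  | (true, post, _) => (true, post)
  | (false, _, _) => (false, [])

-- ===== PRECONDITION & SPEC =====
def Spec_verifyAndGeneratePostorder (preorder : List Int) (out : Bool × List Int) : Prop := out = verifyAndGeneratePostorder_alt preorder
instance (preorder : List Int) (out : Bool × List Int) : Decidable (Spec_verifyAndGeneratePostorder preorder out) := by unfold Spec_verifyAndGeneratePostorder; infer_instance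

-- ===== CLAIM (what is proved, stated in full; the proofs are below) =====
def Claim_equal_verifyAndGeneratePostorder : Prop := ∀ (preorder : List Int), Dom_verifyAndGeneratePostorder preorder → Spec_verifyAndGeneratePostorder preorder (verifyAndGeneratePostorder preorder)

-- ===== LEMMAS AND PROOFS =====

-- one-step unfoldings of bbuild (rfl lemmas used to control rewriting)
theorem bbuild_nil (fuel : Nat) (lo hi : Option Int) :
    bbuild (fuel + 1) lo hi [] = (true, [], []) := rfl

theorem bbuild_cons (fuel : Nat) (lo hi : Option Int) (v : Int) (rest : List Int) :
    bbuild (fuel + 1) lo hi (v :: rest) =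
      (if gtHi hi v then (true, [], v :: rest)
       else if ltLo lo v then (false, [], v :: rest)
       else
        match bbuild fuel lo (some v) rest with
        | (false, _, r1) => (false, [], r1)
        | (true, p1, r1) =>
          match bbuild fuel (some v) hi r1 with
          | (false, _, r2) => (false, [], r2)
          | (true, p2, r2) => (true, p1 ++ p2 ++ [v], r2)) := rfl

-- remaining-suffix length never grows
theorem bbuild_rest_len (fuel : Nat) : ∀ (lo hi : Option Int) (l : List Int),
    (bbuild fuel lo hi l).2.2.length ≤ l.length := by
  induction fuel with
  | zero => intro lo hi l; simp [bbuild]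
  | succ f ih =>
    intro lo hi l
    cases l with
    | nil => simp [bbuild]
    | cons v rest =>
      simp only [bbuild]
      split
      · simp
      · split
        · simp
        · rcases h1 : bbuild f lo (some v) rest with ⟨ok1, p1, r1⟩
          have hr1 : r1.length ≤ rest.length := by
            have := ih lo (some v) rest; rw [h1] at this; simpa using this
          cases ok1 with
          | false => simpa using le_trans hr1 (Nat.le_succ _)
          | true =>
            rcases h2 : bbuild f (some v) hi r1 with ⟨ok2, p2, r2⟩
            have hr2 : r2.length ≤ r1.length := by
              have := ih (some v) hi r1; rw [h2] at this; simpa using this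
            dsimp only
            rw [h2]
            cases ok2 <;> simpa using le_trans (le_trans hr2 hr1) (Nat.le_succ _)

-- bbuild does not depend on fuel once fuel > length
theorem bbuild_fuel_irrel (n : Nat) : ∀ (l : List Int), l.length ≤ n →
    ∀ (lo hi : Option Int) (f f' : Nat), l.length < f → l.length < f' →
    bbuild f lo hi l = bbuild f' lo hi l := by
  induction n with
  | zero =>
    intro l hl lo hi f f' hf hf'
    interval_cases hl' : l.length
    · cases l with
      | nil =>
        cases f with
        | zero => omega
        | succ f => cases f' with
          | zero => omega
          | succ f' => simp [bbuild]
      | cons v rest => simp at hl'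
  | succ n ih =>
    intro l hl lo hi f f' hf hf'
    cases l with
    | nil =>
      cases f with
      | zero => omega
      | succ f => cases f' with
        | zero => omega
        | succ f' => simp [bbuild]
    | cons v rest =>
      cases f with
      | zero => simp at hf
      | succ f =>
        cases f' with
        | zero => simp at hf'
        | succ f' =>
          simp only [List.length_cons] at hl hf hf'
          have hrest : rest.length ≤ n := by omega
          have e1 : bbuild f lo (some v) rest = bbuild f' lo (some v) rest :=
            ih rest hrest lo (some v) f f' (by omega) (by omega)
          simp only [bbuild]
          split
          · rfl
          · split
            · rfl
            · rw [← e1]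
              rcases h1 : bbuild f lo (some v) rest with ⟨ok1, p1, r1⟩
              have hr1 : r1.length ≤ rest.length := by
                have := bbuild_rest_len f lo (some v) rest; rw [h1] at this; simpa using this
              cases ok1 with
              | false => rfl
              | true =>
                have e2 : bbuild f (some v) hi r1 = bbuild f' (some v) hi r1 :=
                  ih r1 (by omega) (some v) hi f f' (by omega) (by omega)
                dsimp only
                rw [e2]

-- one unfolding of genPostF in take/drop form
theorem genPost_cons (fuel : Nat) (root : Int) (rest : List Int) :
    genPostF (fuel + 1) (root :: rest) =
      genPostF fuel (rest.take (List.findIdx (fun x => decide (root < x)) rest))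
        ++ genPostF fuel (rest.drop (List.findIdx (fun x => decide (root < x)) rest))
        ++ [root] := by
  have hfi : List.findIdx (fun val => decide (root < val)) (root :: rest)
      = List.findIdx (fun x => decide (root < x)) rest + 1 := by
    simp [List.findIdx_cons]
  simp only [genPostF, hfi]
  rw [PySem.List.slice_toNat, PySem.List.slice_from_natCast]
  · simp
  · norm_num
  · positivity

-- genPostF does not depend on fuel once fuel > length
theorem genPostF_fuel_irrel (n : Nat) : ∀ (l : List Int), l.length ≤ n →
    ∀ (f f' : Nat), l.length < f → l.length < f' →
    genPostF f l = genPostF f' l := by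
  induction n with
  | zero =>
    intro l hl f f' hf hf'
    cases l with
    | nil => cases f with
      | zero => omega
      | succ f => cases f' with
        | zero => omega
        | succ f' => simp [genPostF]
    | cons v rest => simp at hl
  | succ n ih =>
    intro l hl f f' hf hf'
    cases l with
    | nil =>
      cases f with
      | zero => omega
      | succ f => cases f' with
        | zero => omega
        | succ f' => simp [genPostF]
    | cons root rest =>
      cases f with
      | zero => omega
      | succ f =>
        cases f' with
        | zero => omega
        | succ f' =>
          simp only [List.length_cons] at hl hf hf'
          rw [genPost_cons, genPost_cons]
          have hjl : (rest.take (List.findIdx (fun x => decide (root < x)) rest)).length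
              ≤ rest.length := by simp
          have hdl : (rest.drop (List.findIdx (fun x => decide (root < x)) rest)).length
              ≤ rest.length := by simp
          rw [ih _ (by omega) f f' (by omega) (by omega),
              ih _ (by omega) f f' (by omega) (by omega)]

-- findIdx facts
theorem findIdx_take (p : Int → Bool) : ∀ (xs : List Int) (m : Nat),
    List.findIdx p (xs.take m) = min (List.findIdx p xs) m := by
  intro xs
  induction xs with
  | nil => intro m; simp
  | cons x xs ih =>
    intro m
    cases m with
    | zero => simp
    | succ m =>
      simp only [List.take_succ_cons, List.findIdx_cons]
      cases hp : p x with
      | true => simp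
      | false => simp only [cond_false]; rw [ih m]; omega

theorem findIdx_drop_of_le (p : Int → Bool) : ∀ (xs : List Int) (j : Nat),
    j ≤ List.findIdx p xs →
    List.findIdx p (xs.drop j) = List.findIdx p xs - j := by
  intro xs
  induction xs with
  | nil => intro j h; simp
  | cons x xs ih =>
    intro j h
    cases j with
    | zero => simp
    | succ j =>
      simp only [List.findIdx_cons] at h ⊢
      cases hp : p x with
      | true => simp [hp] at h
      | false =>
        simp only [hp, cond_false] at h ⊢
        simp only [List.drop_succ_cons]
        rw [ih j (by omega)]
        omega

theorem findIdx_mono (p q : Int → Bool) (h : ∀ x, p x = true → q x = true) :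
    ∀ (xs : List Int), List.findIdx q xs ≤ List.findIdx p xs := by
  intro xs
  induction xs with
  | nil => simp
  | cons x xs ih =>
    simp only [List.findIdx_cons]
    cases hq : q x with
    | true => simp
    | false =>
      have hp : p x = false := by
        cases hpx : p x with
        | false => rfl
        | true => rw [h x hpx] at hq; exact absurd hq (by simp)
      simp [hp, ih]

theorem findIdx_gtHi_none (xs : List Int) : List.findIdx (gtHi none) xs = xs.length := by
  induction xs with
  | nil => simp
  | cons x xs ih => simp [List.findIdx_cons, gtHi, ih]

-- main structural lemma about B's build on success
theorem bbuild_ok_spec (n : Nat) : ∀ (l : List Int), l.length ≤ n →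
    ∀ (lo hi : Option Int) (fuel : Nat), l.length < fuel →
    (bbuild fuel lo hi l).1 = true →
    (bbuild fuel lo hi l).2.2 = l.drop (List.findIdx (gtHi hi) l) ∧
    (bbuild fuel lo hi l).2.1 =
      genPostF ((l.take (List.findIdx (gtHi hi) l)).length + 1)
        (l.take (List.findIdx (gtHi hi) l)) := by
  induction n with
  | zero =>
    intro l hl lo hi fuel hf hok
    cases l with
    | nil =>
      cases fuel with
      | zero => omega
      | succ f => rw [bbuild_nil]; constructor <;> simp [genPostF]
    | cons v rest => simp at hl
  | succ n ih =>
    intro l hl lo hi fuel hf hok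
    cases l with
    | nil =>
      cases fuel with
      | zero => omega
      | succ f => rw [bbuild_nil]; constructor <;> simp [genPostF]
    | cons v rest =>
      cases fuel with
      | zero => omega
      | succ f =>
        simp only [List.length_cons] at hl hf
        by_cases hgt : gtHi hi v = true
        · have hfi : List.findIdx (gtHi hi) (v :: rest) = 0 := by
            simp [List.findIdx_cons, hgt]
          rw [bbuild_cons] at hok ⊢
          simp only [hgt, if_true] at hok ⊢
          rw [hfi]
          constructor <;> simp [genPostF]
        · have hgt' : gtHi hi v = false := by simpa using hgt
          have hfi : List.findIdx (gtHi hi) (v :: rest)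
              = List.findIdx (gtHi hi) rest + 1 := by
            simp [List.findIdx_cons, hgt']
          by_cases hlt : ltLo lo v = true
          · rw [bbuild_cons] at hok
            simp [hgt', hlt] at hok
          · have hlt' : ltLo lo v = false := by simpa using hlt
            rw [bbuild_cons] at hok ⊢
            simp only [hgt', hlt', Bool.false_eq_true, if_false] at hok ⊢
            set m := List.findIdx (gtHi hi) rest with hm
            set j := List.findIdx (gtHi (some v)) rest with hj
            have hjm : j ≤ m := by
              cases hi with
              | none => rw [hm, findIdx_gtHi_none]; exact List.findIdx_le_length
              | some h =>
                have hvh : v ≤ h := by simp [gtHi] at hgt'; omega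
                exact findIdx_mono _ _ (by intro x hx; simp [gtHi] at hx ⊢; omega) rest
            rcases hb1 : bbuild f lo (some v) rest with ⟨ok1, p1, r1⟩
            cases ok1 with
            | false => rw [hb1] at hok; simp at hok
            | true =>
              rw [hb1] at hok
              dsimp only at hok ⊢
              have ih1 := ih rest (by omega) lo (some v) f (by omega)
              rw [hb1] at ih1
              obtain ⟨hr1, hp1⟩ := ih1 rfl
              simp only at hr1 hp1
              rcases hb2 : bbuild f (some v) hi r1 with ⟨ok2, p2, r2⟩
              cases ok2 with
              | false => rw [hb2] at hok; simp at hok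
              | true =>
                rw [hb2] at hok
                dsimp only at hok ⊢
                have hr1r : r1.length ≤ rest.length := by
                  have := bbuild_rest_len f lo (some v) rest
                  rw [hb1] at this; simpa using this
                have ih2 := ih r1 (by omega) (some v) hi f (by omega)
                rw [hb2] at ih2
                obtain ⟨hr2, hp2⟩ := ih2 rfl
                simp only at hr2 hp2
                have hfr1 : List.findIdx (gtHi hi) r1 = m - j := by
                  rw [hr1, ← hj, findIdx_drop_of_le _ _ _ (by omega)]
                constructor
                · -- remaining suffix
                  simp only [hfi, hr2, hr1, List.drop_drop, List.drop_succ_cons]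
                  rw [findIdx_drop_of_le _ _ _ (by omega)]
                  congr 1
                  omega
                · -- postorder chunk
                  simp only [hfi, List.take_succ_cons, List.length_cons]
                  rw [genPost_cons]
                  have hpeq : (fun x => decide (v < x)) = gtHi (some v) := by
                    funext x; simp [gtHi]
                  rw [hpeq]
                  have hjt : List.findIdx (gtHi (some v)) (rest.take m) = j := by
                    rw [findIdx_take, ← hj]; omega
                  rw [hjt, List.take_take, min_eq_left hjm, List.drop_take]
                  have e1 : genPostF ((rest.take m).length + 1) (rest.take j)
                      = p1 := by
                    rw [hp1]
                    exact genPostF_fuel_irrel (rest.take m).length _ (by simp; try omega)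
                      _ _ (by simp; try omega) (by simp; try omega)
                  have e2 : genPostF ((rest.take m).length + 1)
                      (List.take (m - j) (rest.drop j)) = p2 := by
                    rw [hp2, hfr1, hr1]
                    exact genPostF_fuel_irrel (rest.take m).length _ (by simp; try omega)
                      _ _ (by simp; try omega) (by simp; try omega)
                  rw [e1, e2]

def chainOk : Option Int → List Int → List Int → Bool
  | lo, [], vs => (bbuild (vs.length + 1) lo none vs).1
  | lo, s :: st, vs =>
    match bbuild (vs.length + 1) lo (some s) vs with
    | (false, _, _) => false
    | (true, _, rest) => chainOk (some s) st rest

def optLE (root : Option Int) (x : Int) : Prop :=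
  match root with
  | none => True
  | some r => r ≤ x

theorem chainOk_nil (stack : List Int) (lo : Option Int) : chainOk lo stack [] = true := by
  induction stack generalizing lo with
  | nil => simp [chainOk, bbuild]
  | cons s st ih => simp [chainOk, bbuild, ih]

theorem popLoop_inv (v : Int) : ∀ (stack : List Int) (root : Option Int),
    List.Pairwise (· ≤ ·) stack → (∀ x ∈ stack, optLE root x) → ltRoot root v = false →
    List.Pairwise (· ≤ ·) (v :: (popLoop root stack v).2) ∧
    (∀ x ∈ v :: (popLoop root stack v).2, optLE (popLoop root stack v).1 x) := by
  intro stack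
  induction stack with
  | nil =>
    intro root _ _ hroot
    refine ⟨by simp [popLoop], ?_⟩
    intro x hx
    simp [popLoop] at hx
    subst hx
    cases root with
    | none => trivial
    | some r => simp [ltRoot] at hroot; simpa [optLE, popLoop] using hroot
  | cons s st ih =>
    intro root hpw hle hroot
    by_cases hs : s < v
    · have h1 : popLoop root (s :: st) v = popLoop (some s) st v := by
        simp [popLoop, hs]
      rw [h1]
      exact ih (some s) (List.Pairwise.of_cons hpw)
        (fun x hx => (List.pairwise_cons.mp hpw).1 x hx)
        (by simp [ltRoot]; omega)
    · have h1 : popLoop root (s :: st) v = (root, s :: st) := by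
        simp [popLoop, hs]
      rw [h1]
      constructor
      · refine List.pairwise_cons.mpr ⟨?_, hpw⟩
        intro x hx
        rcases List.mem_cons.mp hx with hx | hx
        · subst hx; omega
        · have := (List.pairwise_cons.mp hpw).1 x hx; omega
      · intro x hx
        rcases List.mem_cons.mp hx with hx | hx
        · subst hx
          cases root with
          | none => trivial
          | some r => simp [ltRoot] at hroot; simpa [optLE] using hroot
        · exact hle x hx

theorem frame_step (v : Int) (vs' : List Int) : ∀ (stack : List Int) (root : Option Int),
    ltRoot root v = false →
    chainOk root stack (v :: vs') =
      chainOk (popLoop root stack v).1 (v :: (popLoop root stack v).2) vs' := by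
  intro stack
  induction stack with
  | nil =>
    intro root hroot
    have hlo : ltLo root v = false := by
      cases root <;> simpa [ltLo, ltRoot] using hroot
    have hg : gtHi none v = false := rfl
    simp only [popLoop, chainOk, List.length_cons]
    rw [bbuild_cons]
    simp only [hg, hlo, Bool.false_eq_true, if_false]
    rcases hb1 : bbuild (vs'.length + 1) root (some v) vs' with ⟨ok1, p1, r1⟩
    cases ok1 with
    | false => simp
    | true =>
      have hr1 : r1.length ≤ vs'.length := by
        have := bbuild_rest_len (vs'.length + 1) root (some v) vs'
        rw [hb1] at this; simpa using this
      dsimp only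
      rw [bbuild_fuel_irrel r1.length r1 le_rfl (some v) none
        (vs'.length + 1) (r1.length + 1) (by omega) (by omega)]
      rcases hb2 : bbuild (r1.length + 1) (some v) none r1 with ⟨ok2, p2, r2⟩
      cases ok2 <;> simp
  | cons s st ih =>
    intro root hroot
    by_cases hs : s < v
    · have h1 : popLoop root (s :: st) v = popLoop (some s) st v := by
        simp [popLoop, hs]
      have h2 : bbuild ((v :: vs').length + 1) root (some s) (v :: vs')
          = (true, [], v :: vs') := by
        rw [List.length_cons, bbuild_cons]
        simp [gtHi, hs]
      rw [h1, chainOk, h2]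
      exact ih (some s) (by simp [ltRoot]; omega)
    · have h1 : popLoop root (s :: st) v = (root, s :: st) := by
        simp [popLoop, hs]
      have hlo : ltLo root v = false := by
        cases root <;> simpa [ltLo, ltRoot] using hroot
      have hgt : gtHi (some s) v = false := by simp [gtHi]; omega
      rw [h1]
      simp only [chainOk, List.length_cons]
      rw [bbuild_cons]
      simp only [hgt, hlo, Bool.false_eq_true, if_false]
      rcases hb1 : bbuild (vs'.length + 1) root (some v) vs' with ⟨ok1, p1, r1⟩
      cases ok1 with
      | false => simp
      | true =>
        have hr1 : r1.length ≤ vs'.length := by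
          have := bbuild_rest_len (vs'.length + 1) root (some v) vs'
          rw [hb1] at this; simpa using this
        dsimp only
        rw [bbuild_fuel_irrel r1.length r1 le_rfl (some v) (some s)
          (vs'.length + 1) (r1.length + 1) (by omega) (by omega)]
        rcases hb2 : bbuild (r1.length + 1) (some v) (some s) r1 with ⟨ok2, p2, r2⟩
        cases ok2 <;> simp

theorem sim : ∀ (vs : List Int) (root : Option Int) (stack : List Int),
    List.Pairwise (· ≤ ·) stack → (∀ x ∈ stack, optLE root x) →
    checkLoop root stack vs = chainOk root stack vs := by
  intro vs
  induction vs with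
  | nil => intro root stack _ _; rw [chainOk_nil]; rfl
  | cons v vs' ih =>
    intro root stack hpw hle
    by_cases hroot : ltRoot root v = true
    · have hA : checkLoop root stack (v :: vs') = false := by
        simp [checkLoop, hroot]
      rw [hA]
      obtain ⟨r, hr⟩ : ∃ r, root = some r := by
        cases root with
        | none => simp [ltRoot] at hroot
        | some r => exact ⟨r, rfl⟩
      subst hr
      have hvr : v < r := by simpa [ltRoot] using hroot
      have hlo : ltLo (some r) v = true := by simpa [ltLo] using hvr
      cases stack with
      | nil =>
        simp only [chainOk, List.length_cons]
        rw [bbuild_cons]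
        simp [gtHi, hlo]
      | cons s st =>
        have hrs : r ≤ s := by simpa [optLE] using hle s (by simp)
        have hgt : gtHi (some s) v = false := by simp [gtHi]; omega
        simp only [chainOk, List.length_cons]
        rw [bbuild_cons]
        simp [hgt, hlo]
    · have hroot' : ltRoot root v = false := by simpa using hroot
      have hA : checkLoop root stack (v :: vs') =
          checkLoop (popLoop root stack v).1 (v :: (popLoop root stack v).2) vs' := by
        simp [checkLoop, hroot']
      obtain ⟨hpw', hle'⟩ := popLoop_inv v stack root hpw hle hroot'
      rw [hA, frame_step v vs' stack root hroot', ih _ _ hpw' hle']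

-- ===== VERDICT (by name: the statement is the Claim_ definition above) =====
theorem verifyAndGeneratePostorder_spec : Claim_equal_verifyAndGeneratePostorder := by
  intro preorder _
  unfold Spec_verifyAndGeneratePostorder
  unfold verifyAndGeneratePostorder verifyAndGeneratePostorder_alt
  have hsim := sim preorder none [] (by simp) (by simp)
  rcases hb : bbuild (preorder.length + 1) none none preorder with ⟨ok, post, rest⟩
  have hchk : checkLoop none [] preorder = ok := by
    rw [hsim]; simp [chainOk, hb]
  cases ok with
  | false => simp [hchk]
  | true =>
    simp only [hchk, if_true]
    have hspec := bbuild_ok_spec preorder.length preorder le_rfl none none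
      (preorder.length + 1) (by omega) (by rw [hb])
    rw [hb] at hspec
    obtain ⟨_, hpost⟩ := hspec
    rw [findIdx_gtHi_none, List.take_length] at hpost
    simp only at hpost
    rw [hpost]
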